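-- pv_equiv track=rewrite | github.com/Fondamenti18/fondamenti-di-programmazione | students/1496326/homework04/program01.py | findRootKey
-- ===== SOURCE A (Python) =====
-- def findRootKey(key, tree):
--     flag = True
--     for el in tree.keys():
--         if key in tree[el]:
--             flag = False
--             root = findRootKey(el, tree)
--             if root != '':
--                 return root
--     if flag:
--         return key
--     else:
--         return ''
-- ===== SOURCE B (Python) =====
-- def findRootKey(key, tree):
--     # Build the child -> [parents, in dict order] map once, then recurse over it:
--     # A's per-call scan of every dict entry becomes a single lookup.
--     parents = {}
--     for el, children in tree.items():
--         for c in dict.fromkeys(children):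
--             parents.setdefault(c, []).append(el)
--
--     def climb(node):
--         ps = parents.get(node)
--         if ps is None:
--             return node
--         for p in ps:
--             r = climb(p)
--             if r != '':
--                 return r
--         return ''
--
--     return climb(key)
-- ===== Notes on version B (the rewrite author's own statement) =====
-- stated objective: alternative
-- what changed: B builds a child-to-parents map once and recurses over it, replacing A's per-call scan of every dict entry (with a list-membership test each) by one lookup per step; asymptotically O(E+h) vs O(E*h), though not measurably faster on the shallow random inputs of a timing run.
import Mathlib
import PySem

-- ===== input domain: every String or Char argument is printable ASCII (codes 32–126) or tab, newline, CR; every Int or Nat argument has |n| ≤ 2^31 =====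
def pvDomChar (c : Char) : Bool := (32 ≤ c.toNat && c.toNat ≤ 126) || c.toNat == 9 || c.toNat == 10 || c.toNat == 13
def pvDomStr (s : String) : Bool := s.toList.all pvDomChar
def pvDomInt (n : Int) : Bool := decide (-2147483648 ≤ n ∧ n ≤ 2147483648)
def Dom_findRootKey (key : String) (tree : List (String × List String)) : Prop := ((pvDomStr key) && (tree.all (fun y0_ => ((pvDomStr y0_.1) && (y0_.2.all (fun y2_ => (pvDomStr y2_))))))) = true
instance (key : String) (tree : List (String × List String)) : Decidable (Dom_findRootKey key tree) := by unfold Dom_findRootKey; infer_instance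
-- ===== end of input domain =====

-- B replaces A's per-call scan of the whole dict by a child→parents map built once (alternative algorithm).
-- Both Python versions recurse without a bound, so both ports carry a fuel argument;
-- under Pre_ (distinct keys, A's recursion terminates) fuel tree.length+1 is never exhausted.

-- ===== PORT A =====
-- A recurses on the parent `el` of `key`; the Python recursion is unbounded, so the port
-- takes fuel (tree.length + 1 at the top; sufficient under Pre_, see above).
def findRootKeyScan (recF : String → String) (key : String)
    (entries : List (String × List String)) (flag : Bool) : String :=
  match entries with
  | [] => if flag then key else ""
  | (el, cs) :: rest =>
    if key ∈ cs then
      let root := recF el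
      if root ≠ "" then root else findRootKeyScan recF key rest false
    else findRootKeyScan recF key rest flag

def findRootKeyFuel : Nat → String → List (String × List String) → String
  | 0, _, _ => ""                   -- fuel exhaustion (Python: RecursionError); outside Pre_
  | n + 1, key, tree => findRootKeyScan (fun el => findRootKeyFuel n el tree) key tree true

def findRootKey (key : String) (tree : List (String × List String)) : String :=
  findRootKeyFuel (tree.length + 1) key tree

-- ===== PORT B =====
-- parents = {}; for el, children in tree.items(): for c in dict.fromkeys(children): parents.setdefault(c, []).append(el)
def buildParents (tree : List (String × List String)) : PySem.Dict String (List String) :=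
  tree.foldl
    (fun d kv => (PySem.List.dedup kv.2).foldl
      (fun d c => d.insert c (d.getD c [] ++ [kv.1])) d)
    PySem.Dict.empty

-- the `for p in ps:` loop of climb
def climbLoop (recF : String → String) (l : List String) : String :=
  match l with
  | [] => ""
  | p :: rest =>
    let r := recF p
    if r ≠ "" then r else climbLoop recF rest

-- def climb(node): …  (unbounded Python recursion → fuel, as in port A)
def climbFuel : Nat → PySem.Dict String (List String) → String → String
  | 0, _, _ => ""                   -- fuel exhaustion (Python: RecursionError); outside Pre_
  | n + 1, parents, node =>
    match parents.get? node with
    | none => node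
    | some ps => climbLoop (fun p => climbFuel n parents p) ps

def findRootKey_alt (key : String) (tree : List (String × List String)) : String :=
  climbFuel (tree.length + 1) (buildParents tree) key

-- ===== PRECONDITION & SPEC =====
-- the parents (in dict order) of `c`: keys whose children list contains `c`
def pvParentsList (entries : List (String × List String)) (c : String) : List String :=
  (entries.filter (fun kv => c ∈ kv.2)).map Prod.fst

-- Termination analysis of A's recursion, as a monotone fixpoint over the parent graph.
-- Status of a node: 0 = not yet known to terminate, 1 = terminates returning '',
-- 2 = terminates returning a non-'' root.
def pvLookupSt (st : List (String × Nat)) (k : String) : Nat :=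
  ((st.find? (fun e => e.1 == k)).map Prod.snd).getD 0

def pvResolve (tree : List (String × List String)) (st : List (String × Nat))
    (k : String) : Nat :=
  let ps := pvParentsList tree k
  if ps = [] then (if k = "" then 1 else 2)
  else
    match ps.find? (fun p => pvLookupSt st p ≠ 1) with
    | none => 1                                   -- every parent returns ''
    | some p => if pvLookupSt st p = 2 then 2 else 0

-- saturate the statuses (tree.length + 2 rounds reach the fixpoint on ≤ tree.length+1 nodes)
def pvTerm (key : String) (tree : List (String × List String)) : Bool :=
  let nodes := key :: tree.map Prod.fst
  let final := (fun st => nodes.map (fun k => (k, pvResolve tree st k)))^[tree.length + 2]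
                 (nodes.map (fun k => (k, 0)))
  pvLookupSt final key ≠ 0

-- Pre_ excludes association lists with duplicate keys (they do not denote a Python dict)
-- and exactly the inputs on which A's unbounded recursion never returns (Python raises
-- RecursionError there): pvTerm key tree decides whether A's evaluation terminates.
def Pre_findRootKey (key : String) (tree : List (String × List String)) : Prop :=
  (tree.map Prod.fst).Nodup ∧ pvTerm key tree = true

instance (key : String) (tree : List (String × List String)) : Decidable (Pre_findRootKey key tree) := by
  unfold Pre_findRootKey; infer_instance

def pvWitness_findRootKey : String × (List (String × List String)) :=
  ("c", [("b", ["c"]), ("a", ["b"])])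

def Spec_findRootKey (key : String) (tree : List (String × List String)) (out : String) : Prop := out = findRootKey_alt key tree
instance (key : String) (tree : List (String × List String)) (out : String) : Decidable (Spec_findRootKey key tree out) := by unfold Spec_findRootKey; infer_instance

-- ===== CLAIM (what is proved, stated in full; the proofs are below) =====
def Claim_equal_findRootKey : Prop := ∀ (key : String) (tree : List (String × List String)), Dom_findRootKey key tree → Pre_findRootKey key tree → Spec_findRootKey key tree (findRootKey key tree)

-- ===== LEMMAS AND PROOFS =====

-- "first recursive result ≠ ''" shape shared by A's scan loop and B's climb loop
def pvFirstNE (f : String → String) : List String → String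
  | [] => ""
  | p :: rest => if f p ≠ "" then f p else pvFirstNE f rest

theorem pvParentsList_cons (el : String) (cs : List String)
    (rest : List (String × List String)) (c : String) :
    pvParentsList ((el, cs) :: rest) c =
      (if c ∈ cs then [el] else []) ++ pvParentsList rest c := by
  simp only [pvParentsList, List.filter_cons]
  by_cases h : c ∈ cs <;> simp [h]

-- one entry's inner fold: insert `el` at each distinct child
theorem buildParents_inner (l : List String) (hnd : l.Nodup) (el : String)
    (d : PySem.Dict String (List String)) (c : String) :
    (l.foldl (fun d c' => d.insert c' (d.getD c' [] ++ [el])) d).get? c =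
      if c ∈ l then some (d.getD c [] ++ [el]) else d.get? c := by
  induction l generalizing d with
  | nil => simp
  | cons x xs ih =>
    rcases List.nodup_cons.mp hnd with ⟨hx, hxs⟩
    simp only [List.foldl_cons]
    rw [ih hxs]
    by_cases hc : c = x
    · subst hc
      simp [hx, PySem.Dict.get?_insert_self]
    · simp [hc, PySem.Dict.get?_insert, PySem.Dict.getD_insert]

theorem buildParents_inner_getD (l : List String) (hnd : l.Nodup) (el : String)
    (d : PySem.Dict String (List String)) (c : String) :
    (l.foldl (fun d c' => d.insert c' (d.getD c' [] ++ [el])) d).getD c [] =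
      if c ∈ l then d.getD c [] ++ [el] else d.getD c [] := by
  rw [PySem.Dict.getD_eq_get?_getD, buildParents_inner l hnd el d c]
  by_cases hc : c ∈ l
  · simp [hc]
  · simp [hc, PySem.Dict.getD_eq_get?_getD]

-- the whole build fold, generalised over the accumulator
theorem buildParents_fold (entries : List (String × List String))
    (d : PySem.Dict String (List String)) (c : String) :
    ((entries.foldl
        (fun d kv => (PySem.List.dedup kv.2).foldl
          (fun d c' => d.insert c' (d.getD c' [] ++ [kv.1])) d) d).get? c) =
      if pvParentsList entries c = [] then d.get? c
      else some (d.getD c [] ++ pvParentsList entries c) := by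
  induction entries generalizing d with
  | nil => simp [pvParentsList]
  | cons kv rest ih =>
    obtain ⟨el, cs⟩ := kv
    simp only [List.foldl_cons]
    rw [ih, pvParentsList_cons]
    have hnd : (PySem.List.dedup cs).Nodup := PySem.List.nodup_dedup cs
    have hmem : (c ∈ PySem.List.dedup cs) = (c ∈ cs) := by
      simp
    rw [buildParents_inner (PySem.List.dedup cs) hnd el d c,
        buildParents_inner_getD (PySem.List.dedup cs) hnd el d c]
    simp only [hmem]
    by_cases hc : c ∈ cs
    · by_cases hrest : pvParentsList rest c = [] <;> simp [hc, hrest]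
    · by_cases hrest : pvParentsList rest c = [] <;> simp [hc, hrest]

theorem buildParents_get (tree : List (String × List String)) (c : String) :
    (buildParents tree).get? c =
      if pvParentsList tree c = [] then none else some (pvParentsList tree c) := by
  unfold buildParents
  rw [buildParents_fold]
  simp [PySem.Dict.get?_empty, PySem.Dict.getD_empty]

-- A's scan loop computes the first-nonempty recursive result over the parents of key
theorem findRootKeyScan_eq (recF : String → String) (key : String)
    (entries : List (String × List String)) (flag : Bool) :
    findRootKeyScan recF key entries flag =
      if pvParentsList entries key = [] then (if flag then key else "")
      else pvFirstNE recF (pvParentsList entries key) := by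
  induction entries generalizing flag with
  | nil => simp [findRootKeyScan, pvParentsList]
  | cons kv rest ih =>
    obtain ⟨el, cs⟩ := kv
    rw [findRootKeyScan, pvParentsList_cons]
    by_cases hk : key ∈ cs
    · simp only [hk, if_pos, List.cons_append, List.nil_append]
      by_cases hroot : recF el ≠ ""
      · simp [hroot, pvFirstNE]
      · simp only [not_not] at hroot
        rw [ih]
        by_cases hrest : pvParentsList rest key = [] <;>
          simp [hrest, pvFirstNE, hroot]
    · simp only [hk, ite_false, List.nil_append]
      exact ih flag

theorem climbLoop_eq (recF : String → String) (l : List String) :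
    climbLoop recF l = pvFirstNE recF l := by
  induction l with
  | nil => simp [climbLoop, pvFirstNE]
  | cons p rest ih => rw [climbLoop, pvFirstNE, ih]

theorem pvFirstNE_congr (f g : String → String) (h : ∀ x, f x = g x) (l : List String) :
    pvFirstNE f l = pvFirstNE g l := by
  induction l with
  | nil => rfl
  | cons p rest ih => simp only [pvFirstNE, h p, ih]

-- main fuel-parametric equivalence: no precondition needed, the out-of-fuel values coincide
theorem fuel_equiv (n : Nat) (tree : List (String × List String)) :
    ∀ key, findRootKeyFuel n key tree = climbFuel n (buildParents tree) key := by
  induction n with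
  | zero => intro key; rfl
  | succ n ih =>
    intro key
    rw [findRootKeyFuel, climbFuel, findRootKeyScan_eq, buildParents_get]
    by_cases h : pvParentsList tree key = []
    · simp [h]
    · simp only [h, ite_false]
      rw [climbLoop_eq]
      exact pvFirstNE_congr _ _ (fun el => ih el) _

-- ===== VERDICT (by name: the statement is the Claim_ definition above) =====
theorem findRootKey_spec : Claim_equal_findRootKey := by
  intro key tree _ _
  unfold Spec_findRootKey findRootKey findRootKey_alt
  exact fuel_equiv (tree.length + 1) tree key
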